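-- pv_equiv track=rewrite | github.com/HB-the-Pencil/Python-Chapter-7 | grammar_library.py | punctuate_list
-- ===== SOURCE A (Python) =====
-- def punctuate_list(list_of_items, title=False, conjunction="and", ending="."):
--     # Convert all items into strings so they can be concatenated.
--     items = [str(item) for item in list_of_items]
--     message = ""
--
--     if len(items) == 0:
--         return "Nothing in list."
--
--     # Loop through the list.
--     for i in range(len(items)):
--         # Define the item. I had to rewrite because .index() only finds the
--         # first occurrence.
--         item = items[i]
--
--         # If it's before the next-to-last place, add a comma to the end.
--         if i < len(items) - 2:
--             if title:
--                 message += f"{item.title()}, "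
--             else:
--                 message += f"{item}, "
--
--         # If it's the next to last place, add "and".
--         elif i < len(items) - 1:
--             # Omit the comma if the list length is two.
--             if len(items) == 2:
--                 if title:
--                     message += f"{item.title()} {conjunction} "
--                 else:
--                     message += f"{item} {conjunction} "
--             else:
--                 if title:
--                     message += f"{item.title()}, {conjunction} "
--                 else:
--                     message += f"{item}, {conjunction} "
--
--         # If it's the last place, add a period and a newline.
--         else:
--             if title:
--                 message += f"{item.title()}{ending}"
--             else:
--                 message += f"{item}{ending}"
--
--     # Return the message.
--     return message
-- ===== SOURCE B (Python) =====
-- def punctuate_list(list_of_items, title=False, conjunction="and", ending="."):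
--     items = [str(x).title() if title else str(x) for x in list_of_items]
--     if len(items) == 0:
--         return "Nothing in list."
--     if len(items) == 1:
--         return items[0] + ending
--     if len(items) == 2:
--         return items[0] + " " + conjunction + " " + items[1] + ending
--     return ", ".join(items[:-1]) + ", " + conjunction + " " + items[-1] + ending
-- ===== Notes on version B (the rewrite author's own statement) =====
-- stated objective: simpler
-- what changed: Replaced the per-index loop with position-dependent branching by a single map of the title transform followed by a length dispatch using ', '.join over the prefix slice.
import Mathlib
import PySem

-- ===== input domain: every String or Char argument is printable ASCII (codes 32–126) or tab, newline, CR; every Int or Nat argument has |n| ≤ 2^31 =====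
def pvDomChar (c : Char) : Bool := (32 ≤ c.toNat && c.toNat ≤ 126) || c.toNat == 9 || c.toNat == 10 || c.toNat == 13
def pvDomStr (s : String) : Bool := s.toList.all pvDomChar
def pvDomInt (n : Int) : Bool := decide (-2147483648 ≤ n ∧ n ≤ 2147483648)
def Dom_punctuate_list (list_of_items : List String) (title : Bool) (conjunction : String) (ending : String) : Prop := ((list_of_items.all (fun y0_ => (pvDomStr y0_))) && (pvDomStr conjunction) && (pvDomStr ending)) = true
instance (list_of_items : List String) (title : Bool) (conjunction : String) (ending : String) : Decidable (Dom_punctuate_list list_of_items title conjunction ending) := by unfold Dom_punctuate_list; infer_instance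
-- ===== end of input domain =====

-- B replaces A's per-index loop with one map of the title transform and a length dispatch with join: simpler.
-- ===== PORT A =====
-- Python str.title() for ASCII: a cased (alphabetic) char is uppercased after a
-- non-cased char and lowercased after a cased char. Exact on the ASCII domain.
def pyTitleGo : Bool → List Char → List Char
  | _, [] => []
  | prev, c :: rest =>
    if PySem.Chars.isalpha c then
      (if prev then PySem.Chars.lowerChar c else PySem.Chars.upperChar c) :: pyTitleGo true rest
    else
      c :: pyTitleGo false rest

def pyTitle (s : String) : String := String.ofList (pyTitleGo false s.toList)

-- A's loop over range(len(items)): the branch 'i < len-2 / i < len-1 / last' is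
-- transliterated as recursion on the suffix (rest.length > 1 / = 1 / 0 respectively),
-- with total = len(items) kept for the '== 2' check, message the accumulator.
def punctALoop (title : Bool) (conjunction ending : String) (total : Nat) :
    List String → String → String
  | [], message => message
  | item :: rest, message =>
    if rest.length > 1 then
      punctALoop title conjunction ending total rest
        (if title then message ++ pyTitle item ++ ", " else message ++ item ++ ", ")
    else if rest.length = 1 then
      punctALoop title conjunction ending total rest
        (if total = 2 then
          (if title then message ++ pyTitle item ++ " " ++ conjunction ++ " "
           else message ++ item ++ " " ++ conjunction ++ " ")
         else
          (if title then message ++ pyTitle item ++ ", " ++ conjunction ++ " "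
           else message ++ item ++ ", " ++ conjunction ++ " "))
    else
      message ++ (if title then pyTitle item else item) ++ ending

def punctuate_list (list_of_items : List String) (title : Bool) (conjunction : String) (ending : String) : String :=
  let items := list_of_items   -- str(item) is the identity on strings
  if items.length = 0 then "Nothing in list."
  else punctALoop title conjunction ending items.length items ""

-- ===== PORT B =====
def punctuate_list_alt (list_of_items : List String) (title : Bool) (conjunction : String) (ending : String) : String :=
  let items := list_of_items.map (fun x => if title then pyTitle x else x)
  if items.length = 0 then "Nothing in list."
  else if items.length = 1 then items.head! ++ ending
  else if items.length = 2 then items.head! ++ " " ++ conjunction ++ " " ++ items.getLast! ++ ending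
  else PySem.Str.join ", " items.dropLast ++ ", " ++ conjunction ++ " " ++ items.getLast! ++ ending

-- ===== PRECONDITION & SPEC =====
def Spec_punctuate_list (list_of_items : List String) (title : Bool) (conjunction : String) (ending : String) (out : String) : Prop := out = punctuate_list_alt list_of_items title conjunction ending
instance (list_of_items : List String) (title : Bool) (conjunction : String) (ending : String) (out : String) : Decidable (Spec_punctuate_list list_of_items title conjunction ending out) := by unfold Spec_punctuate_list; infer_instance

-- ===== CLAIM (what is proved, stated in full; the proofs are below) =====
def Claim_equal_punctuate_list : Prop := ∀ (list_of_items : List String) (title : Bool) (conjunction : String) (ending : String), Dom_punctuate_list list_of_items title conjunction ending → Spec_punctuate_list list_of_items title conjunction ending (punctuate_list list_of_items title conjunction ending)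

-- ===== LEMMAS AND PROOFS =====

theorem strExt {s t : String} (h : s.toList = t.toList) : s = t := by
  have h2 := congrArg String.ofList h
  simpa using h2

theorem strJoin_single (x : String) : PySem.Str.join ", " [x] = x := by
  apply strExt
  simp [PySem.Str.toList_join, PySem.Chars.join_singleton]

theorem strJoin_cons (x y : String) (l : List String) :
    PySem.Str.join ", " (x :: y :: l) = x ++ ", " ++ PySem.Str.join ", " (y :: l) := by
  apply strExt
  simp [PySem.Str.toList_join, PySem.Chars.join_cons_cons, String.append_assoc]

-- The per-item transform shared by both sides.
def pvTr (title : Bool) (x : String) : String := if title then pyTitle x else x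

theorem punctALoop_pair (title : Bool) (conjunction ending : String) (total : Nat)
    (x y msg : String) (h2 : total ≠ 2) :
    punctALoop title conjunction ending total [x, y] msg =
      msg ++ pvTr title x ++ ", " ++ conjunction ++ " " ++ pvTr title y ++ ending := by
  simp only [punctALoop, pvTr, List.length, h2]
  cases title <;> simp [String.append_assoc]

-- Core invariant: on a suffix of length ≥ 2, with total ≠ 2, the loop appends the
-- joined prefix, the conjunction and the transformed last item to the accumulator.
theorem punctALoop_ge2 (title : Bool) (conjunction ending : String) (total : Nat)
    (h2 : total ≠ 2) :
    ∀ (l : List String) (msg : String), 2 ≤ l.length →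
    punctALoop title conjunction ending total l msg =
      msg ++ PySem.Str.join ", " ((l.map (pvTr title)).dropLast) ++ ", " ++
        conjunction ++ " " ++ ((l.map (pvTr title)).getLast?.getD "") ++ ending := by
  intro l
  induction l with
  | nil => intro msg h; simp at h
  | cons a t ih =>
    intro msg h
    match t, h with
    | [y], _ =>
      rw [punctALoop_pair title conjunction ending total a y msg h2]
      simp [strJoin_single, String.append_assoc]
    | b :: c :: t', _ =>
      have hlen : 1 < (b :: c :: t').length := by simp
      have step : punctALoop title conjunction ending total (a :: b :: c :: t') msg =
          punctALoop title conjunction ending total (b :: c :: t')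
            (msg ++ pvTr title a ++ ", ") := by
        simp only [punctALoop, hlen, if_pos]
        cases title <;> simp [pvTr]
      rw [step, ih (msg ++ pvTr title a ++ ", ") (by simp)]
      have hdl : ((a :: b :: c :: t').map (pvTr title)).dropLast
          = pvTr title a :: ((b :: c :: t').map (pvTr title)).dropLast := by
        simp
      have hjoin : PySem.Str.join ", " (((a :: b :: c :: t').map (pvTr title)).dropLast)
          = pvTr title a ++ ", " ++ PySem.Str.join ", " (((b :: c :: t').map (pvTr title)).dropLast) := by
        rw [hdl]
        cases t' with
        | nil => exact strJoin_cons _ _ _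
        | cons d t'' =>
          have : ((b :: c :: d :: t'').map (pvTr title)).dropLast
              = pvTr title b :: ((c :: d :: t'').map (pvTr title)).dropLast := by simp
          rw [this]
          exact strJoin_cons _ _ _
      have hlast : ((a :: b :: c :: t').map (pvTr title)).getLast?
          = ((b :: c :: t').map (pvTr title)).getLast? := by
        simp [List.getLast?_cons_cons]
      rw [hjoin, hlast]
      simp [String.append_assoc]

-- ===== VERDICT (by name: the statement is the Claim_ definition above) =====
theorem punctuate_list_spec : Claim_equal_punctuate_list := by
  intro l title conjunction ending _
  unfold Spec_punctuate_list punctuate_list punctuate_list_alt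
  have htr : (fun x => if title = true then pyTitle x else x) = pvTr title := rfl
  rw [htr]
  match l with
  | [] => simp
  | [a] =>
    simp only [punctALoop, List.length]
    cases title <;> simp [pvTr]
  | [a, b] =>
    simp only [punctALoop, List.length]
    cases title <;> simp [pvTr, String.append_assoc]
  | a :: b :: c :: t =>
    have h2 : (a :: b :: c :: t).length ≠ 2 := by simp
    rw [if_neg (by simp), punctALoop_ge2 title conjunction ending (a :: b :: c :: t).length h2
      (a :: b :: c :: t) "" (by simp)]
    have hl0 : ¬ ((a :: b :: c :: t).map (pvTr title)).length = 0 := by simp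
    have hl1 : ¬ ((a :: b :: c :: t).map (pvTr title)).length = 1 := by simp
    have hl2 : ¬ ((a :: b :: c :: t).map (pvTr title)).length = 2 := by simp
    rw [if_neg hl0, if_neg hl1, if_neg hl2]
    simp [String.append_assoc]
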